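-- pv_equiv track=rewrite | github.com/AndreaFavero71/cat_at_the_door | src/portable/lib/datetime_converter.py | get_last_sunday
-- ===== SOURCE A (Python) =====
-- def get_last_sunday(year, month):
--     """
--     Get the last Sunday of a given month and year.
--     """
--     if month == 3:      # March
--         last_day = 31
--     elif month == 10:   # October
--         last_day = 31
--     else:
--         return None  # Only March and October are relevant for DST
--
--     # Find the last Sunday
--     for day in range(last_day, 0, -1):
--         # Use Zeller's congruence to find the day of the week
--         if month < 3:
--             month += 12
--             year -= 1
--         q = day
--         m = month
--         K = year % 100
--         J = year // 100
--         h = (q + (13 * (m + 1)) // 5 + K + (K // 4) + (J // 4) + 5 * J) % 7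
--         # h = 0 corresponds to Saturday, 1 = Sunday, 2 = Monday, etc.
--         if h == 1:  # Sunday
--             return day
--     return None
-- ===== SOURCE B (Python) =====
-- def get_last_sunday(year, month):
--     if month != 3 and month != 10:
--         return None  # Only March and October are relevant for DST
--     # Zeller's congruence for day 31 of the month (h = 1 means Sunday),
--     # then step back (h - 1) % 7 days: no loop needed.
--     K = year % 100
--     J = year // 100
--     h = (31 + (13 * (month + 1)) // 5 + K + K // 4 + J // 4 + 5 * J) % 7
--     return 31 - (h - 1) % 7
-- ===== Notes on version B (the rewrite author's own statement) =====
-- stated objective: simpler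
-- what changed: Replaces A's descending day-by-day scan of range(31,0,-1) (Zeller's congruence re-evaluated per day) by one Zeller evaluation for day 31 and the closed form 31 - (h - 1) % 7; no loop at all.
import Mathlib
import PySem

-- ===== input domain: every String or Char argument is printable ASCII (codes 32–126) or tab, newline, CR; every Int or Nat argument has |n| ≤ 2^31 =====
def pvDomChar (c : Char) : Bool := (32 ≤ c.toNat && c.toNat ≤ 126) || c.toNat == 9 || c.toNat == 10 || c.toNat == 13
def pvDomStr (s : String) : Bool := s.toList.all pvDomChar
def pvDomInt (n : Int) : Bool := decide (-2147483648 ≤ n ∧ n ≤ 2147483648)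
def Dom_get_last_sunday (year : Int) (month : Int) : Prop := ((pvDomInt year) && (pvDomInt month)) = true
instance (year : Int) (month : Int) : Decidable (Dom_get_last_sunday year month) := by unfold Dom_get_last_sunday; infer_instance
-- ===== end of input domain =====

-- B replaces A's descending day scan by a single closed-form Zeller computation
-- for day 31 (objective: simpler; no loop).

-- ===== PORT A =====
-- A's for-loop over range(last_day, 0, -1), threading the (possibly adjusted)
-- year/month exactly as the Python body does.
def pvZellerLoop : List Int → Int → Int → Option Int
  | [], _, _ => none
  | day :: rest, year, month =>
    let month' := if month < 3 then month + 12 else month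
    let year' := if month < 3 then year - 1 else year
    let q := day
    let m := month'
    let K := PySem.Int.mod year' 100
    let J := PySem.Int.floordiv year' 100
    let h := PySem.Int.mod (q + PySem.Int.floordiv (13 * (m + 1)) 5 + K + PySem.Int.floordiv K 4 + PySem.Int.floordiv J 4 + 5 * J) 7
    if h = 1 then some day else pvZellerLoop rest year' month'

def get_last_sunday (year : Int) (month : Int) : Option Int :=
  if month = 3 then
    pvZellerLoop (PySem.List.pyRange 31 0 (-1)) year month
  else if month = 10 then
    pvZellerLoop (PySem.List.pyRange 31 0 (-1)) year month
  else none

-- ===== PORT B =====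
def get_last_sunday_alt (year : Int) (month : Int) : Option Int :=
  if month ≠ 3 ∧ month ≠ 10 then none
  else
    let K := PySem.Int.mod year 100
    let J := PySem.Int.floordiv year 100
    let h := PySem.Int.mod (31 + PySem.Int.floordiv (13 * (month + 1)) 5 + K + PySem.Int.floordiv K 4 + PySem.Int.floordiv J 4 + 5 * J) 7
    some (31 - PySem.Int.mod (h - 1) 7)

-- ===== PRECONDITION & SPEC =====
def Spec_get_last_sunday (year : Int) (month : Int) (out : Option Int) : Prop := out = get_last_sunday_alt year month
instance (year : Int) (month : Int) (out : Option Int) : Decidable (Spec_get_last_sunday year month out) := by unfold Spec_get_last_sunday; infer_instance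

-- ===== CLAIM (what is proved, stated in full; the proofs are below) =====
def Claim_equal_get_last_sunday : Prop := ∀ (year : Int) (month : Int), Dom_get_last_sunday year month → Spec_get_last_sunday year month (get_last_sunday year month)

-- ===== LEMMAS AND PROOFS =====

-- The descending scan finds t, the unique day in [25,31] whose Zeller value is 1.
lemma pvZellerLoop_finds (year month C t : Int) (h3 : ¬ month < 3)
    (hC : C = PySem.Int.floordiv (13 * (month + 1)) 5 + PySem.Int.mod year 100 +
      PySem.Int.floordiv (PySem.Int.mod year 100) 4 +
      PySem.Int.floordiv (PySem.Int.floordiv year 100) 4 + 5 * PySem.Int.floordiv year 100)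
    (ht : (30 + C) % 7 = 31 - t) :
    ∀ (n : Nat) (d : Int), d - t = n → t ≤ d → d ≤ 31 →
      pvZellerLoop (PySem.List.pyRange d 0 (-1)) year month = some t := by
  intro n
  induction n with
  | zero =>
    intro d hd _ _
    have hdt : d = t := by omega
    subst hdt
    rw [PySem.List.pyRange_neg_one_cons (by omega)]
    simp only [pvZellerLoop, if_neg h3]
    rw [if_pos]
    rw [PySem.Int.mod_eq_emod_of_pos (by norm_num)]
    omega
  | succ k ih =>
    intro d hd hlo hhi
    have hdt : t < d := by omega
    rw [PySem.List.pyRange_neg_one_cons (by omega)]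
    simp only [pvZellerLoop, if_neg h3]
    rw [if_neg]
    · exact ih (d - 1) (by omega) (by omega) (by omega)
    · rw [PySem.Int.mod_eq_emod_of_pos (by norm_num)]
      omega

lemma pvLoop_eq_closed (year month : Int) (h3 : ¬ month < 3) :
    pvZellerLoop (PySem.List.pyRange 31 0 (-1)) year month =
      some (31 - PySem.Int.mod (PySem.Int.mod (31 + PySem.Int.floordiv (13 * (month + 1)) 5 +
        PySem.Int.mod year 100 + PySem.Int.floordiv (PySem.Int.mod year 100) 4 +
        PySem.Int.floordiv (PySem.Int.floordiv year 100) 4 + 5 * PySem.Int.floordiv year 100) 7 - 1) 7) := by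
  set C := PySem.Int.floordiv (13 * (month + 1)) 5 + PySem.Int.mod year 100 +
      PySem.Int.floordiv (PySem.Int.mod year 100) 4 +
      PySem.Int.floordiv (PySem.Int.floordiv year 100) 4 + 5 * PySem.Int.floordiv year 100 with hC
  set t := 31 - (30 + C) % 7 with htdef
  have ht : (30 + C) % 7 = 31 - t := by omega
  have hres : (31 - PySem.Int.mod (PySem.Int.mod (31 + C) 7 - 1) 7) = t := by
    rw [PySem.Int.mod_eq_emod_of_pos (b := 7) (by norm_num),
        PySem.Int.mod_eq_emod_of_pos (b := 7) (by norm_num)]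
    omega
  have := pvZellerLoop_finds year month C t h3 hC ht (31 - t).toNat 31 (by omega) (by omega) (by omega)
  rw [this]
  have harg : 31 + C = 31 + PySem.Int.floordiv (13 * (month + 1)) 5 +
      PySem.Int.mod year 100 + PySem.Int.floordiv (PySem.Int.mod year 100) 4 +
      PySem.Int.floordiv (PySem.Int.floordiv year 100) 4 + 5 * PySem.Int.floordiv year 100 := by
    rw [hC]; ring
  rw [← harg, hres]

-- ===== VERDICT (by name: the statement is the Claim_ definition above) =====
theorem get_last_sunday_spec : Claim_equal_get_last_sunday := by
  intro year month _
  unfold Spec_get_last_sunday get_last_sunday get_last_sunday_alt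
  by_cases h3 : month = 3
  · subst h3
    rw [if_pos rfl, pvLoop_eq_closed year 3 (by omega)]
    norm_num
  · by_cases h10 : month = 10
    · subst h10
      rw [if_neg h3, if_pos rfl, pvLoop_eq_closed year 10 (by omega)]
      norm_num
    · rw [if_neg h3, if_neg h10, if_pos ⟨h3, h10⟩]
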